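-- pv_equiv track=rewrite | github.com/seung-hun-h/algorithm | programmers/back-end/summer/3.py | solution
-- ===== SOURCE A (Python) =====
-- def solution(maps, p, r):
--     answer = 0
--     N, M = len(maps), len(maps[0])
--
--     for y in range(N):
--         for x in range(M):
--             # 1분면
--             cnt1 = 0
--             cnt2 = 0
--             y1, x1 = y-1, x-1
--             for y_offset in range(r//2):
--                 for x_offset in range(r//2):
--                     if y_offset + x_offset >= r//2: continue
--                     if not(0<=y1-y_offset<N and 0<=x1-x_offset<M): continue
--                     if y_offset + x_offset >= (r//2)-1:
--                         if maps[y1-y_offset][x1-x_offset] <= p // 2: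
--                             cnt1 += 1
--                     else:
--                         if maps[y1-y_offset][x1-x_offset] <= p:
--                             cnt2 += 1
--             # 2분면
--             y2, x2 = y-1, x
--             for y_offset in range(r//2):
--                 for x_offset in range(r//2):
--                     if y_offset + x_offset >= r//2: continue
--                     if not(0<=y2-y_offset<N and 0<=x2+x_offset<M): continue
--                     if y_offset + x_offset >= (r//2)-1:
--                         if maps[y2-y_offset][x2+x_offset] <= p // 2:
--                             cnt1 += 1
--                     else:
--                         if maps[y2-y_offset][x2+x_offset] <= p:
--                             cnt2 += 1
--             # 3분면
--             y3, x3 = y, x-1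
--             for y_offset in range(r//2):
--                 for x_offset in range(r//2):
--                     if y_offset + x_offset >= r//2: continue
--                     if not(0<=y3+y_offset<N and 0<=x3-x_offset<M): continue
--                     if y_offset + x_offset >= (r//2)-1:
--                         if maps[y3+y_offset][x3-x_offset] <= p // 2:
--                             cnt1 += 1
--                     else:
--                         if maps[y3+y_offset][x3-x_offset] <= p:
--
--                             cnt2 += 1
--             # 4분면
--             for y_offset in range(r//2):
--                 for x_offset in range(r//2):
--                     if y_offset + x_offset >= r//2: continue
--                     if not(0<=y+y_offset<N and 0<=x+x_offset<M): continue
--                     if y_offset + x_offset >= (r//2)-1: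
--                         if maps[y+y_offset][x+x_offset] <= p // 2:
--                             cnt1 += 1
--                     else:
--                         if maps[y+y_offset][x+x_offset] <= p:
--                             cnt2 += 1
--
--             answer = max(answer, cnt1+cnt2)
--     return answer
-- ===== SOURCE B (Python) =====
-- def solution(maps, p, r):
--     # Diamond counting via per-row prefix counts: each diamond row is a
--     # contiguous column interval (interior, threshold p) plus two boundary
--     # cells (threshold p//2), so one O(1)+O(1) step per diamond row.
--     N = len(maps)
--     M = len(maps[0])
--     h = r // 2
--     q = p // 2
--     prefP = []
--     for row in maps:
--         cp = [0]
--         for v in row[:M]: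
--             cp.append(cp[-1] + (1 if v <= p else 0))
--         prefP.append(cp)
--     best = 0
--     for y in range(N):
--         for x in range(M):
--             cnt = 0
--             for i in range(max(0, y - h), min(N, y + h)):
--                 dy = i - y if i >= y else y - 1 - i
--                 k = h - 1 - dy
--                 a = max(0, x - k)
--                 b = min(M, x + k)
--                 if a < b:
--                     cnt += prefP[i][b] - prefP[i][a]
--                 jl = x - 1 - k
--                 if 0 <= jl and maps[i][jl] <= q:
--                     cnt += 1
--                 jr = x + k
--                 if jr < M and maps[i][jr] <= q:
--                     cnt += 1
--             if best < cnt: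
--                 cnt, best = best, cnt
--     return best
-- ===== Notes on version B (the rewrite author's own statement) =====
-- stated objective: faster
-- what changed: B replaces A's four O(r^2) quadrant scans per centre by per-row prefix counts: each diamond row is one contiguous interval answered by a prefix-sum difference plus two boundary-cell checks, O(r) per centre instead of O(r^2).
import Mathlib
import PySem

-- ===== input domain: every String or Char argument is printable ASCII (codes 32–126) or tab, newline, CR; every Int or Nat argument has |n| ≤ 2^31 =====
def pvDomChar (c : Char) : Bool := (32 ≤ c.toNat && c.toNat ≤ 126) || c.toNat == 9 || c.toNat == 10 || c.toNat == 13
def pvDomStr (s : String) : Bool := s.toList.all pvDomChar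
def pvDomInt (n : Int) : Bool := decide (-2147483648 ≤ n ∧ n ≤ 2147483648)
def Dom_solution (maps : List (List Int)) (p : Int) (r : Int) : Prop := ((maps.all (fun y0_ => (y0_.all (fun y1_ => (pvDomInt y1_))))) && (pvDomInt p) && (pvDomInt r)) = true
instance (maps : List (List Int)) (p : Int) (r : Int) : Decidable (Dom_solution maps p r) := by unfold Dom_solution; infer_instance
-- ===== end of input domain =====

-- B replaces A's four O(r^2) quadrant scans per centre by one O(1) step per diamond row
-- (per-row prefix counts + two boundary cells); objective: faster.

-- ===== PORT A =====
-- maps[i][j] (defaults only reachable outside Pre_solution)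
def pvCell (maps : List (List Int)) (i j : Int) : Int :=
  PySem.List.pyGetD (PySem.List.pyGetD maps i []) j 0

-- one quadrant double loop of A, updating the (cnt1, cnt2) pair
def pvQuad (maps : List (List Int)) (N M p h : Int) (iOf jOf : Int → Int)
    (cnt : Int × Int) : Int × Int :=
  (PySem.List.pyRange 0 h 1).foldl (fun c yo =>
    (PySem.List.pyRange 0 h 1).foldl (fun c xo =>
      if h ≤ yo + xo then c
      else if ¬ (0 ≤ iOf yo ∧ iOf yo < N ∧ 0 ≤ jOf xo ∧ jOf xo < M) then c
      else if h - 1 ≤ yo + xo then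
        (if pvCell maps (iOf yo) (jOf xo) ≤ PySem.Int.floordiv p 2 then (c.1 + 1, c.2) else c)
      else
        (if pvCell maps (iOf yo) (jOf xo) ≤ p then (c.1, c.2 + 1) else c)) c) cnt

def solution (maps : List (List Int)) (p : Int) (r : Int) : Int :=
  let N : Int := maps.length
  let M : Int := maps.headI.length
  let h : Int := PySem.Int.floordiv r 2
  (PySem.List.pyRange 0 N 1).foldl (fun answer y =>
    (PySem.List.pyRange 0 M 1).foldl (fun answer x =>
      let c := pvQuad maps N M p h (fun yo => y - 1 - yo) (fun xo => x - 1 - xo) (0, 0)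
      let c := pvQuad maps N M p h (fun yo => y - 1 - yo) (fun xo => x + xo) c
      let c := pvQuad maps N M p h (fun yo => y + yo) (fun xo => x - 1 - xo) c
      let c := pvQuad maps N M p h (fun yo => y + yo) (fun xo => x + xo) c
      max answer (c.1 + c.2)) answer) 0

-- ===== PORT B =====
-- prefix counts of values ≤ p over one row ('cp.append(cp[-1] + (1 if v <= p else 0))')
def pvPref (l : List Int) (p : Int) : List Int :=
  l.foldl (fun cp v => cp ++ [PySem.List.pyGetD cp (-1) 0 + (if v ≤ p then 1 else 0)]) [0]

def solution_alt (maps : List (List Int)) (p : Int) (r : Int) : Int :=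
  let N : Int := maps.length
  let M : Int := maps.headI.length
  let h : Int := PySem.Int.floordiv r 2
  let q : Int := PySem.Int.floordiv p 2
  let prefP := maps.foldl (fun acc row => acc ++ [pvPref (PySem.List.slice row none (some M)) p]) []
  (PySem.List.pyRange 0 N 1).foldl (fun best y =>
    (PySem.List.pyRange 0 M 1).foldl (fun best x =>
      let cnt := (PySem.List.pyRange (max 0 (y - h)) (min N (y + h)) 1).foldl (fun cnt i =>
        let dy := if y ≤ i then i - y else y - 1 - i
        let k := h - 1 - dy
        let a := max 0 (x - k)
        let b := min M (x + k)
        let cnt := if a < b then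
            cnt + PySem.List.pyGetD (PySem.List.pyGetD prefP i []) b 0
                - PySem.List.pyGetD (PySem.List.pyGetD prefP i []) a 0
          else cnt
        let cnt := if 0 ≤ x - 1 - k ∧ pvCell maps i (x - 1 - k) ≤ q then cnt + 1 else cnt
        if x + k < M ∧ pvCell maps i (x + k) ≤ q then cnt + 1 else cnt) 0
      if best < cnt then cnt else best) best) 0

-- ===== PRECONDITION & SPEC =====
-- Pre_ excludes exactly the inputs where A raises: maps == [] (maps[0] IndexError), and,
-- when r ≥ 2 (so some cell is read), a row shorter than len(maps[0]) (IndexError).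
def Pre_solution (maps : List (List Int)) (p : Int) (r : Int) : Prop :=
  maps ≠ [] ∧ (2 ≤ r → ∀ row ∈ maps, maps.headI.length ≤ row.length)
instance (maps : List (List Int)) (p : Int) (r : Int) : Decidable (Pre_solution maps p r) := by
  unfold Pre_solution; infer_instance

def pvWitness_solution : List (List Int) × Int × Int := ([[0, 3], [4, 1]], 2, 3)

def Spec_solution (maps : List (List Int)) (p : Int) (r : Int) (out : Int) : Prop := out = solution_alt maps p r
instance (maps : List (List Int)) (p : Int) (r : Int) (out : Int) : Decidable (Spec_solution maps p r out) := by unfold Spec_solution; infer_instance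

-- ===== CLAIM (what is proved, stated in full; the proofs are below) =====
def Claim_equal_solution : Prop := ∀ (maps : List (List Int)) (p : Int) (r : Int), Dom_solution maps p r → Pre_solution maps p r → Spec_solution maps p r (solution maps p r)

-- ===== LEMMAS AND PROOFS =====

-- distance of row/column i from the half-integer centre line at c - 1/2
def dy0 (c i : Int) : Int := if c ≤ i then i - c else c - 1 - i

-- 0/1 indicator: cell (i,j) has value ≤ t
def indT (maps : List (List Int)) (t i j : Int) : Int :=
  if pvCell maps i j ≤ t then 1 else 0

-- weight of cell (i,j) for the diamond centred between the four cells around (y,x)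
def wc (maps : List (List Int)) (N M p q h y x i j : Int) : Int :=
  if (0 ≤ i ∧ i < N ∧ 0 ≤ j ∧ j < M) ∧ dy0 y i + dy0 x j ≤ h - 1 then
    (if h - 1 ≤ dy0 y i + dy0 x j then indT maps q i j else indT maps p i j)
  else 0

theorem dy0_nonneg (c i : Int) : 0 ≤ dy0 c i := by
  unfold dy0; split_ifs <;> omega

theorem dy0_add (c : Int) (k : Nat) : dy0 c (c + (k : Int)) = (k : Int) := by
  unfold dy0; split_ifs <;> omega

theorem dy0_sub (c : Int) (k : Nat) : dy0 c (c - 1 - (k : Int)) = (k : Int) := by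
  unfold dy0; split_ifs <;> omega

theorem list_sum_range (f : Nat → Int) (n : Nat) :
    ((List.range n).map f).sum = ∑ k ∈ Finset.range n, f k := by
  induction n with
  | zero => simp
  | succ m ih => rw [List.range_succ, Finset.sum_range_succ, List.map_append, List.sum_append, ih]; simp

theorem fold_pair_add (l : List Int) (step : Int × Int → Int → Int × Int) (u v : Int → Int)
    (hstep : ∀ c e, step c e = (c.1 + u e, c.2 + v e)) :
    ∀ c : Int × Int, l.foldl step c = (c.1 + (l.map u).sum, c.2 + (l.map v).sum) := by
  induction l with
  | nil => intro c; simp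
  | cons e t ih =>
      intro c
      simp only [List.foldl_cons, List.map_cons, List.sum_cons, ih, hstep]
      simp only [Prod.mk.injEq]
      constructor <;> ring

-- sum over [0,n) of a vanishing-outside-window function equals the shifted window sum (ℕ offset)
theorem sum_range_shift_nat (F : Nat → Int) (n lo len : Nat)
    (hlo : ∀ b, b < lo → F b = 0) (hhi : ∀ b, lo + len ≤ b → F b = 0)
    (hn : ∀ b, n ≤ b → F b = 0) :
    ∑ b ∈ Finset.range n, F b = ∑ k ∈ Finset.range len, F (lo + k) := by
  have h1 : ∑ b ∈ Finset.range n, F b = ∑ b ∈ Finset.range (max n (lo + len)), F b := by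
    refine Finset.sum_subset (fun b hb => ?_) ?_
    · rw [Finset.mem_range] at hb ⊢
      omega
    intro b _ hb
    exact hn b (by simpa using (Finset.mem_range.not.1 hb))
  have h2 : ∑ k ∈ Finset.range len, F (lo + k) = ∑ b ∈ Finset.Ico lo (lo + len), F b := by
    rw [Finset.sum_Ico_eq_sum_range]
    simp
  have h3 : ∑ b ∈ Finset.Ico lo (lo + len), F b = ∑ b ∈ Finset.range (max n (lo + len)), F b := by
    refine Finset.sum_subset ?_ ?_
    · intro b hb
      rw [Finset.mem_range]
      have := (Finset.mem_Ico.1 hb).2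
      omega
    · intro b _ hb
      rw [Finset.mem_Ico] at hb
      rcases Nat.lt_or_ge b lo with hb' | hb'
      · exact hlo b hb'
      · exact hhi b (by omega)
  rw [h1, h2, h3]

-- same with an ℤ offset o (window [o, o+len) meets [0,n))
theorem sum_range_shift_int (f : Int → Int) (n : Nat) (o : Int) (len : Nat)
    (hneg : ∀ i : Int, i < 0 → f i = 0) (hn : ∀ i : Int, (n : Int) ≤ i → f i = 0)
    (hlo : ∀ i : Int, 0 ≤ i → i < o → f i = 0) (hhi : ∀ i : Int, o + (len : Int) ≤ i → f i = 0) :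
    ∑ b ∈ Finset.range n, f (b : Int) = ∑ k ∈ Finset.range len, f (o + (k : Int)) := by
  by_cases ho : 0 ≤ o
  · have : ∑ k ∈ Finset.range len, f (o + (k : Int)) = ∑ k ∈ Finset.range len, (fun b : Nat => f (b : Int)) (o.toNat + k) := by
      refine Finset.sum_congr rfl ?_
      intro k _
      congr 1
      omega
    rw [this]
    refine sum_range_shift_nat (fun b => f (b : Int)) n o.toNat len ?_ ?_ ?_
    · intro b hb; exact hlo b (by omega) (by omega)
    · intro b hb; exact hhi b (by omega)
    · intro b hb; exact hn b (by omega)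
  · -- negative offset: the part of the window below 0 vanishes
    by_cases hcase : (len : Int) ≤ -o
    · -- whole window below 0: both sides vanish
      have hL : ∑ b ∈ Finset.range n, f (b : Int) = 0 := by
        refine Finset.sum_eq_zero ?_
        intro b _
        exact hhi b (by omega)
      have hR : ∑ k ∈ Finset.range len, f (o + (k : Int)) = 0 := by
        refine Finset.sum_eq_zero ?_
        intro k hk
        rw [Finset.mem_range] at hk
        exact hneg _ (by omega)
      rw [hL, hR]
    · have hmlt : (-o).toNat < len := by omega
      have hsplit : ∑ k ∈ Finset.range len, f (o + (k : Int))
          = ∑ k ∈ Finset.Ico (-o).toNat len, f (o + (k : Int)) := by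
        rw [Finset.range_eq_Ico, ← Finset.sum_Ico_consecutive _ (Nat.zero_le _) (le_of_lt hmlt)]
        have : ∑ k ∈ Finset.Ico 0 (-o).toNat, f (o + (k : Int)) = 0 := by
          refine Finset.sum_eq_zero ?_
          intro k hk
          rw [Finset.mem_Ico] at hk
          exact hneg _ (by omega)
        rw [this, zero_add]
      rw [hsplit, Finset.sum_Ico_eq_sum_range]
      have : ∑ k ∈ Finset.range (len - (-o).toNat), f (o + ((((-o).toNat + k : Nat)) : Int))
          = ∑ k ∈ Finset.range (len - (-o).toNat), (fun b : Nat => f (b : Int)) (0 + k) := by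
        refine Finset.sum_congr rfl ?_
        intro k _
        congr 1
        omega
      rw [this]
      refine sum_range_shift_nat (fun b => f (b : Int)) n 0 (len - (-o).toNat) ?_ ?_ ?_
      · intro b hb; omega
      · intro b hb; exact hhi b (by omega)
      · intro b hb; exact hn b (by omega)

-- band sum: restrict a range-sum by an interval condition
theorem sum_band (f : Nat → Int) (n : Nat) (lo hi : Int) :
    ∑ b ∈ Finset.range n, (if lo ≤ (b : Int) ∧ (b : Int) < hi then f b else 0)
      = ∑ b ∈ Finset.Ico lo.toNat (min hi.toNat n), f b := by
  have hsub : Finset.Ico lo.toNat (min hi.toNat n) ⊆ Finset.range n := by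
    intro b hb
    rw [Finset.mem_Ico] at hb
    rw [Finset.mem_range]
    omega
  rw [← Finset.sum_subset hsub (by
    intro b hb hnb
    rw [Finset.mem_range] at hb
    rw [Finset.mem_Ico] at hnb
    rw [if_neg]
    omega)]
  refine Finset.sum_congr rfl ?_
  intro b hb
  rw [Finset.mem_Ico] at hb
  rw [if_pos]
  omega

-- point sum
theorem sum_point (f : Nat → Int) (n : Nat) (t : Int) :
    ∑ b ∈ Finset.range n, (if (b : Int) = t then f b else 0)
      = if 0 ≤ t ∧ t < (n : Int) then f t.toNat else 0 := by
  by_cases ht : 0 ≤ t ∧ t < (n : Int)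
  · rw [if_pos ht]
    rw [Finset.sum_eq_single_of_mem t.toNat (by rw [Finset.mem_range]; omega)]
    · rw [if_pos (by omega)]
    · intro b _ hb
      rw [if_neg]
      omega
  · rw [if_neg ht]
    refine Finset.sum_eq_zero ?_
    intro b hb
    rw [Finset.mem_range] at hb
    rw [if_neg]
    omega


-- merged per-quadrant summand of A (cnt1 and cnt2 together)
def gqA (maps : List (List Int)) (N M p h : Int) (iOf jOf : Int → Int) (yo xo : Int) : Int :=
  if yo + xo ≤ h - 1 ∧ (0 ≤ iOf yo ∧ iOf yo < N ∧ 0 ≤ jOf xo ∧ jOf xo < M) then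
    (if h - 1 ≤ yo + xo then indT maps (PySem.Int.floordiv p 2) (iOf yo) (jOf xo)
     else indT maps p (iOf yo) (jOf xo))
  else 0

-- the cnt1 / cnt2 components of one quadrant step
def pvG1 (maps : List (List Int)) (N M p h : Int) (iOf jOf : Int → Int) (yo xo : Int) : Int :=
  if ¬ h ≤ yo + xo ∧ (0 ≤ iOf yo ∧ iOf yo < N ∧ 0 ≤ jOf xo ∧ jOf xo < M) ∧ h - 1 ≤ yo + xo then
    indT maps (PySem.Int.floordiv p 2) (iOf yo) (jOf xo)
  else 0

def pvG2 (maps : List (List Int)) (N M p h : Int) (iOf jOf : Int → Int) (yo xo : Int) : Int :=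
  if ¬ h ≤ yo + xo ∧ (0 ≤ iOf yo ∧ iOf yo < N ∧ 0 ≤ jOf xo ∧ jOf xo < M) ∧ ¬ h - 1 ≤ yo + xo then
    indT maps p (iOf yo) (jOf xo)
  else 0

theorem gqA_eq_G1_add_G2 (maps : List (List Int)) (N M p h : Int) (iOf jOf : Int → Int)
    (yo xo : Int) : gqA maps N M p h iOf jOf yo xo
      = pvG1 maps N M p h iOf jOf yo xo + pvG2 maps N M p h iOf jOf yo xo := by
  unfold gqA pvG1 pvG2
  split_ifs <;> first | rfl | (exfalso; omega) | ring

theorem quad_step (maps : List (List Int)) (N M p h : Int) (iOf jOf : Int → Int)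
    (c : Int × Int) (yo xo : Int) :
    (if h ≤ yo + xo then c
      else if ¬ (0 ≤ iOf yo ∧ iOf yo < N ∧ 0 ≤ jOf xo ∧ jOf xo < M) then c
      else if h - 1 ≤ yo + xo then
        (if pvCell maps (iOf yo) (jOf xo) ≤ PySem.Int.floordiv p 2 then (c.1 + 1, c.2) else c)
      else
        (if pvCell maps (iOf yo) (jOf xo) ≤ p then (c.1, c.2 + 1) else c))
    = (c.1 + pvG1 maps N M p h iOf jOf yo xo, c.2 + pvG2 maps N M p h iOf jOf yo xo) := by
  obtain ⟨c1, c2⟩ := c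
  unfold pvG1 pvG2 indT
  split_ifs <;> first | rfl | (exfalso; omega) | simp

theorem sum_map_pyRange_zero (F : Int → Int) (h : Int) :
    ((PySem.List.pyRange 0 h 1).map F).sum = ∑ k ∈ Finset.range h.toNat, F (k : Int) := by
  rw [PySem.List.pyRange_one, List.map_map, list_sum_range]
  have he : (h - 0).toNat = h.toNat := by norm_num
  rw [he]
  exact Finset.sum_congr rfl (fun k _ => by simp [Function.comp])

theorem quad_sum (maps : List (List Int)) (N M p h : Int) (iOf jOf : Int → Int) (c : Int × Int) :
    (pvQuad maps N M p h iOf jOf c).1 + (pvQuad maps N M p h iOf jOf c).2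
      = c.1 + c.2 + ∑ yo ∈ Finset.range h.toNat, ∑ xo ∈ Finset.range h.toNat,
          gqA maps N M p h iOf jOf (yo : Int) (xo : Int) := by
  have hinner : ∀ (yo : Int) (c : Int × Int),
      (PySem.List.pyRange 0 h 1).foldl (fun c xo =>
        if h ≤ yo + xo then c
        else if ¬ (0 ≤ iOf yo ∧ iOf yo < N ∧ 0 ≤ jOf xo ∧ jOf xo < M) then c
        else if h - 1 ≤ yo + xo then
          (if pvCell maps (iOf yo) (jOf xo) ≤ PySem.Int.floordiv p 2 then (c.1 + 1, c.2) else c)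
        else
          (if pvCell maps (iOf yo) (jOf xo) ≤ p then (c.1, c.2 + 1) else c)) c
      = (c.1 + ((PySem.List.pyRange 0 h 1).map (pvG1 maps N M p h iOf jOf yo)).sum,
         c.2 + ((PySem.List.pyRange 0 h 1).map (pvG2 maps N M p h iOf jOf yo)).sum) := by
    intro yo c
    exact fold_pair_add _ _ _ _ (fun c xo => quad_step maps N M p h iOf jOf c yo xo) c
  have houter : pvQuad maps N M p h iOf jOf c
      = (c.1 + ((PySem.List.pyRange 0 h 1).map (fun yo =>
            ((PySem.List.pyRange 0 h 1).map (pvG1 maps N M p h iOf jOf yo)).sum)).sum,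
         c.2 + ((PySem.List.pyRange 0 h 1).map (fun yo =>
            ((PySem.List.pyRange 0 h 1).map (pvG2 maps N M p h iOf jOf yo)).sum)).sum) := by
    unfold pvQuad
    exact fold_pair_add _ _ _ _ (fun c yo => hinner yo c) c
  rw [houter]
  have hl : ∀ g : Int → Int → Int,
      ((PySem.List.pyRange 0 h 1).map (fun yo => ((PySem.List.pyRange 0 h 1).map (g yo)).sum)).sum
      = ∑ yo ∈ Finset.range h.toNat, ∑ xo ∈ Finset.range h.toNat, g (yo : Int) (xo : Int) := by
    intro g
    rw [sum_map_pyRange_zero]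
    exact Finset.sum_congr rfl (fun yo _ => sum_map_pyRange_zero (g (yo : Int)) h)
  rw [hl, hl]
  have : ∀ yo xo : Nat, gqA maps N M p h iOf jOf (yo : Int) (xo : Int)
      = pvG1 maps N M p h iOf jOf (yo : Int) (xo : Int)
        + pvG2 maps N M p h iOf jOf (yo : Int) (xo : Int) :=
    fun yo xo => gqA_eq_G1_add_G2 maps N M p h iOf jOf _ _
  simp only [this, Finset.sum_add_distrib]
  ring

-- one 1-D reindexing: a half-diamond arm along an axis as a restricted full-range sum
theorem axis_pos (g : Int → Int) (c : Int) (n : Nat) (h : Int)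
    (hg0 : ∀ j : Int, j < 0 → g j = 0) (hgn : ∀ j : Int, (n : Int) ≤ j → g j = 0)
    (hdia : ∀ j : Int, h ≤ dy0 c j → g j = 0) :
    ∑ k ∈ Finset.range h.toNat, g (c + (k : Int))
      = ∑ b ∈ Finset.range n, (if c ≤ (b : Int) then g (b : Int) else 0) := by
  have hmain := sum_range_shift_int (fun i => if c ≤ i then g i else 0) n c h.toNat
    (fun i hi => by beta_reduce; split_ifs with hc; exacts [hg0 i hi, rfl])
    (fun i hi => by beta_reduce; split_ifs with hc; exacts [hgn i hi, rfl])
    (fun i _ hi => by beta_reduce; rw [if_neg (by omega)])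
    (fun i hi => by
      beta_reduce
      split_ifs with hc
      exacts [hdia i (by unfold dy0; rw [if_pos hc]; omega), rfl])
  beta_reduce at hmain
  have hfin : ∑ k ∈ Finset.range h.toNat, g (c + (k : Int))
      = ∑ k ∈ Finset.range h.toNat, (if c ≤ c + (k : Int) then g (c + (k : Int)) else 0) := by
    refine Finset.sum_congr rfl (fun k _ => ?_)
    rw [if_pos (by omega)]
  rw [hfin]
  exact hmain.symm

theorem axis_neg (g : Int → Int) (c : Int) (n : Nat) (h : Int)
    (hg0 : ∀ j : Int, j < 0 → g j = 0) (hgn : ∀ j : Int, (n : Int) ≤ j → g j = 0)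
    (hdia : ∀ j : Int, h ≤ dy0 c j → g j = 0) :
    ∑ k ∈ Finset.range h.toNat, g (c - 1 - (k : Int))
      = ∑ b ∈ Finset.range n, (if (b : Int) < c then g (b : Int) else 0) := by
  have hrefl := Finset.sum_range_reflect (fun k : Nat => g ((c - (h.toNat : Int)) + (k : Int))) h.toNat
  have hlhs : ∑ k ∈ Finset.range h.toNat, g (c - 1 - (k : Int))
      = ∑ k ∈ Finset.range h.toNat, g ((c - (h.toNat : Int)) + (k : Int)) := by
    rw [← hrefl]
    refine Finset.sum_congr rfl (fun k hk => ?_)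
    rw [Finset.mem_range] at hk
    congr 1
    omega
  rw [hlhs]
  have hmain := sum_range_shift_int (fun i => if i < c then g i else 0) n (c - (h.toNat : Int)) h.toNat
    (fun i hi => by beta_reduce; split_ifs with hc; exacts [hg0 i hi, rfl])
    (fun i hi => by beta_reduce; split_ifs with hc; exacts [hgn i hi, rfl])
    (fun i h0i hi => by
      beta_reduce
      split_ifs with hc
      exacts [hdia i (by unfold dy0; rw [if_neg (by omega)]; omega), rfl])
    (fun i hi => by beta_reduce; rw [if_neg (by omega)])
  beta_reduce at hmain
  have hfin : ∑ k ∈ Finset.range h.toNat, g ((c - (h.toNat : Int)) + (k : Int))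
      = ∑ k ∈ Finset.range h.toNat, (if (c - (h.toNat : Int)) + (k : Int) < c then g ((c - (h.toNat : Int)) + (k : Int)) else 0) := by
    refine Finset.sum_congr rfl (fun k hk => ?_)
    rw [Finset.mem_range] at hk
    rw [if_pos (by omega)]
  rw [hfin]
  exact hmain.symm

-- vanishing facts for wc
theorem wc_zero_col (maps : List (List Int)) (N M p q h y x i : Int) :
    ∀ j : Int, h ≤ dy0 x j → wc maps N M p q h y x i j = 0 := by
  intro j hj
  unfold wc
  rw [if_neg]
  have := dy0_nonneg y i
  have := dy0_nonneg x j
  omega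

theorem wc_zero_row (maps : List (List Int)) (N M p q h y x j : Int) :
    ∀ i : Int, h ≤ dy0 y i → wc maps N M p q h y x i j = 0 := by
  intro i hi
  unfold wc
  rw [if_neg]
  have := dy0_nonneg y i
  have := dy0_nonneg x j
  omega

theorem wc_zero_out (maps : List (List Int)) (N M p q h y x i j : Int)
    (hout : ¬ (0 ≤ i ∧ i < N ∧ 0 ≤ j ∧ j < M)) : wc maps N M p q h y x i j = 0 := by
  unfold wc
  rw [if_neg]
  tauto

-- pointwise identification of A's quadrant summand with the cell weight
theorem gqA_pp (maps : List (List Int)) (N M p h y x : Int) (yo xo : Nat) :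
    gqA maps N M p h (fun a => y + a) (fun b => x + b) (yo : Int) (xo : Int)
      = wc maps N M p (PySem.Int.floordiv p 2) h y x (y + (yo : Int)) (x + (xo : Int)) := by
  unfold gqA wc
  beta_reduce
  rw [dy0_add, dy0_add]
  split_ifs <;> first | rfl | (exfalso; omega)

theorem gqA_pn (maps : List (List Int)) (N M p h y x : Int) (yo xo : Nat) :
    gqA maps N M p h (fun a => y + a) (fun b => x - 1 - b) (yo : Int) (xo : Int)
      = wc maps N M p (PySem.Int.floordiv p 2) h y x (y + (yo : Int)) (x - 1 - (xo : Int)) := by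
  unfold gqA wc
  beta_reduce
  rw [dy0_add, dy0_sub]
  split_ifs <;> first | rfl | (exfalso; omega)

theorem gqA_np (maps : List (List Int)) (N M p h y x : Int) (yo xo : Nat) :
    gqA maps N M p h (fun a => y - 1 - a) (fun b => x + b) (yo : Int) (xo : Int)
      = wc maps N M p (PySem.Int.floordiv p 2) h y x (y - 1 - (yo : Int)) (x + (xo : Int)) := by
  unfold gqA wc
  beta_reduce
  rw [dy0_sub, dy0_add]
  split_ifs <;> first | rfl | (exfalso; omega)

theorem gqA_nn (maps : List (List Int)) (N M p h y x : Int) (yo xo : Nat) :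
    gqA maps N M p h (fun a => y - 1 - a) (fun b => x - 1 - b) (yo : Int) (xo : Int)
      = wc maps N M p (PySem.Int.floordiv p 2) h y x (y - 1 - (yo : Int)) (x - 1 - (xo : Int)) := by
  unfold gqA wc
  beta_reduce
  rw [dy0_sub, dy0_sub]
  split_ifs <;> first | rfl | (exfalso; omega)

def centerA (maps : List (List Int)) (p h y x : Int) : Int × Int :=
  pvQuad maps (maps.length : Int) (maps.headI.length : Int) p h (fun yo => y + yo) (fun xo => x + xo)
    (pvQuad maps (maps.length : Int) (maps.headI.length : Int) p h (fun yo => y + yo) (fun xo => x - 1 - xo)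
      (pvQuad maps (maps.length : Int) (maps.headI.length : Int) p h (fun yo => y - 1 - yo) (fun xo => x + xo)
        (pvQuad maps (maps.length : Int) (maps.headI.length : Int) p h (fun yo => y - 1 - yo) (fun xo => x - 1 - xo) (0, 0))))

theorem quadsum_pp (maps : List (List Int)) (p q h y x : Int) (N' M' : Nat) :
    ∑ yo ∈ Finset.range h.toNat, ∑ xo ∈ Finset.range h.toNat,
        wc maps (N' : Int) (M' : Int) p q h y x (y + (yo : Int)) (x + (xo : Int))
      = ∑ a ∈ Finset.range N', (if y ≤ (a : Int) then
          ∑ b ∈ Finset.range M', (if x ≤ (b : Int) then wc maps (N' : Int) (M' : Int) p q h y x (a : Int) (b : Int) else 0) else 0) := by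
  have hcol : ∀ i : Int, ∑ xo ∈ Finset.range h.toNat, wc maps (N' : Int) (M' : Int) p q h y x i (x + (xo : Int))
      = ∑ b ∈ Finset.range M', (if x ≤ (b : Int) then wc maps (N' : Int) (M' : Int) p q h y x i (b : Int) else 0) :=
    fun i => axis_pos (fun j => wc maps (N' : Int) (M' : Int) p q h y x i j) x M' h
      (fun j hj => wc_zero_out _ _ _ _ _ _ _ _ _ _ (by omega))
      (fun j hj => wc_zero_out _ _ _ _ _ _ _ _ _ _ (by omega))
      (fun j hj => wc_zero_col _ _ _ _ _ _ _ _ _ j hj)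
  refine (Finset.sum_congr rfl (fun (yo : Nat) _ => hcol (y + (yo : Int)))).trans ?_
  exact axis_pos (fun i => ∑ b ∈ Finset.range M', (if x ≤ (b : Int) then wc maps (N' : Int) (M' : Int) p q h y x i (b : Int) else 0)) y N' h
    (fun i hi => Finset.sum_eq_zero (fun b _ => by
      beta_reduce; split_ifs
      exacts [wc_zero_out _ _ _ _ _ _ _ _ _ _ (by omega), rfl]))
    (fun i hi => Finset.sum_eq_zero (fun b _ => by
      beta_reduce; split_ifs
      exacts [wc_zero_out _ _ _ _ _ _ _ _ _ _ (by omega), rfl]))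
    (fun i hi => Finset.sum_eq_zero (fun b _ => by
      beta_reduce; split_ifs
      exacts [wc_zero_row _ _ _ _ _ _ _ _ _ i hi, rfl]))

theorem quadsum_pn (maps : List (List Int)) (p q h y x : Int) (N' M' : Nat) :
    ∑ yo ∈ Finset.range h.toNat, ∑ xo ∈ Finset.range h.toNat,
        wc maps (N' : Int) (M' : Int) p q h y x (y + (yo : Int)) (x - 1 - (xo : Int))
      = ∑ a ∈ Finset.range N', (if y ≤ (a : Int) then
          ∑ b ∈ Finset.range M', (if (b : Int) < x then wc maps (N' : Int) (M' : Int) p q h y x (a : Int) (b : Int) else 0) else 0) := by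
  have hcol : ∀ i : Int, ∑ xo ∈ Finset.range h.toNat, wc maps (N' : Int) (M' : Int) p q h y x i (x - 1 - (xo : Int))
      = ∑ b ∈ Finset.range M', (if (b : Int) < x then wc maps (N' : Int) (M' : Int) p q h y x i (b : Int) else 0) :=
    fun i => axis_neg (fun j => wc maps (N' : Int) (M' : Int) p q h y x i j) x M' h
      (fun j hj => wc_zero_out _ _ _ _ _ _ _ _ _ _ (by omega))
      (fun j hj => wc_zero_out _ _ _ _ _ _ _ _ _ _ (by omega))
      (fun j hj => wc_zero_col _ _ _ _ _ _ _ _ _ j hj)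
  refine (Finset.sum_congr rfl (fun (yo : Nat) _ => hcol (y + (yo : Int)))).trans ?_
  exact axis_pos (fun i => ∑ b ∈ Finset.range M', (if (b : Int) < x then wc maps (N' : Int) (M' : Int) p q h y x i (b : Int) else 0)) y N' h
    (fun i hi => Finset.sum_eq_zero (fun b _ => by
      beta_reduce; split_ifs
      exacts [wc_zero_out _ _ _ _ _ _ _ _ _ _ (by omega), rfl]))
    (fun i hi => Finset.sum_eq_zero (fun b _ => by
      beta_reduce; split_ifs
      exacts [wc_zero_out _ _ _ _ _ _ _ _ _ _ (by omega), rfl]))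
    (fun i hi => Finset.sum_eq_zero (fun b _ => by
      beta_reduce; split_ifs
      exacts [wc_zero_row _ _ _ _ _ _ _ _ _ i hi, rfl]))

theorem quadsum_np (maps : List (List Int)) (p q h y x : Int) (N' M' : Nat) :
    ∑ yo ∈ Finset.range h.toNat, ∑ xo ∈ Finset.range h.toNat,
        wc maps (N' : Int) (M' : Int) p q h y x (y - 1 - (yo : Int)) (x + (xo : Int))
      = ∑ a ∈ Finset.range N', (if (a : Int) < y then
          ∑ b ∈ Finset.range M', (if x ≤ (b : Int) then wc maps (N' : Int) (M' : Int) p q h y x (a : Int) (b : Int) else 0) else 0) := by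
  have hcol : ∀ i : Int, ∑ xo ∈ Finset.range h.toNat, wc maps (N' : Int) (M' : Int) p q h y x i (x + (xo : Int))
      = ∑ b ∈ Finset.range M', (if x ≤ (b : Int) then wc maps (N' : Int) (M' : Int) p q h y x i (b : Int) else 0) :=
    fun i => axis_pos (fun j => wc maps (N' : Int) (M' : Int) p q h y x i j) x M' h
      (fun j hj => wc_zero_out _ _ _ _ _ _ _ _ _ _ (by omega))
      (fun j hj => wc_zero_out _ _ _ _ _ _ _ _ _ _ (by omega))
      (fun j hj => wc_zero_col _ _ _ _ _ _ _ _ _ j hj)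
  refine (Finset.sum_congr rfl (fun (yo : Nat) _ => hcol (y - 1 - (yo : Int)))).trans ?_
  exact axis_neg (fun i => ∑ b ∈ Finset.range M', (if x ≤ (b : Int) then wc maps (N' : Int) (M' : Int) p q h y x i (b : Int) else 0)) y N' h
    (fun i hi => Finset.sum_eq_zero (fun b _ => by
      beta_reduce; split_ifs
      exacts [wc_zero_out _ _ _ _ _ _ _ _ _ _ (by omega), rfl]))
    (fun i hi => Finset.sum_eq_zero (fun b _ => by
      beta_reduce; split_ifs
      exacts [wc_zero_out _ _ _ _ _ _ _ _ _ _ (by omega), rfl]))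
    (fun i hi => Finset.sum_eq_zero (fun b _ => by
      beta_reduce; split_ifs
      exacts [wc_zero_row _ _ _ _ _ _ _ _ _ i hi, rfl]))

theorem quadsum_nn (maps : List (List Int)) (p q h y x : Int) (N' M' : Nat) :
    ∑ yo ∈ Finset.range h.toNat, ∑ xo ∈ Finset.range h.toNat,
        wc maps (N' : Int) (M' : Int) p q h y x (y - 1 - (yo : Int)) (x - 1 - (xo : Int))
      = ∑ a ∈ Finset.range N', (if (a : Int) < y then
          ∑ b ∈ Finset.range M', (if (b : Int) < x then wc maps (N' : Int) (M' : Int) p q h y x (a : Int) (b : Int) else 0) else 0) := by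
  have hcol : ∀ i : Int, ∑ xo ∈ Finset.range h.toNat, wc maps (N' : Int) (M' : Int) p q h y x i (x - 1 - (xo : Int))
      = ∑ b ∈ Finset.range M', (if (b : Int) < x then wc maps (N' : Int) (M' : Int) p q h y x i (b : Int) else 0) :=
    fun i => axis_neg (fun j => wc maps (N' : Int) (M' : Int) p q h y x i j) x M' h
      (fun j hj => wc_zero_out _ _ _ _ _ _ _ _ _ _ (by omega))
      (fun j hj => wc_zero_out _ _ _ _ _ _ _ _ _ _ (by omega))
      (fun j hj => wc_zero_col _ _ _ _ _ _ _ _ _ j hj)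
  refine (Finset.sum_congr rfl (fun (yo : Nat) _ => hcol (y - 1 - (yo : Int)))).trans ?_
  exact axis_neg (fun i => ∑ b ∈ Finset.range M', (if (b : Int) < x then wc maps (N' : Int) (M' : Int) p q h y x i (b : Int) else 0)) y N' h
    (fun i hi => Finset.sum_eq_zero (fun b _ => by
      beta_reduce; split_ifs
      exacts [wc_zero_out _ _ _ _ _ _ _ _ _ _ (by omega), rfl]))
    (fun i hi => Finset.sum_eq_zero (fun b _ => by
      beta_reduce; split_ifs
      exacts [wc_zero_out _ _ _ _ _ _ _ _ _ _ (by omega), rfl]))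
    (fun i hi => Finset.sum_eq_zero (fun b _ => by
      beta_reduce; split_ifs
      exacts [wc_zero_row _ _ _ _ _ _ _ _ _ i hi, rfl]))

theorem centerA_sum (maps : List (List Int)) (p h y x : Int) :
    (centerA maps p h y x).1 + (centerA maps p h y x).2
      = ∑ a ∈ Finset.range maps.length, ∑ b ∈ Finset.range maps.headI.length,
          wc maps (maps.length : Int) (maps.headI.length : Int) p (PySem.Int.floordiv p 2) h y x (a : Int) (b : Int) := by
  unfold centerA
  rw [quad_sum, quad_sum, quad_sum, quad_sum]
  have hq1 : ∑ yo ∈ Finset.range h.toNat, ∑ xo ∈ Finset.range h.toNat,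
        gqA maps (maps.length : Int) (maps.headI.length : Int) p h (fun a => y - 1 - a) (fun b => x - 1 - b) (yo : Int) (xo : Int)
      = ∑ a ∈ Finset.range maps.length, (if (a : Int) < y then
          ∑ b ∈ Finset.range maps.headI.length, (if (b : Int) < x then
            wc maps (maps.length : Int) (maps.headI.length : Int) p (PySem.Int.floordiv p 2) h y x (a : Int) (b : Int) else 0) else 0) :=
    (Finset.sum_congr rfl (fun yo _ => Finset.sum_congr rfl (fun xo _ =>
      gqA_nn maps (maps.length : Int) (maps.headI.length : Int) p h y x yo xo))).trans
      (quadsum_nn maps p (PySem.Int.floordiv p 2) h y x maps.length maps.headI.length)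
  have hq2 : ∑ yo ∈ Finset.range h.toNat, ∑ xo ∈ Finset.range h.toNat,
        gqA maps (maps.length : Int) (maps.headI.length : Int) p h (fun a => y - 1 - a) (fun b => x + b) (yo : Int) (xo : Int)
      = ∑ a ∈ Finset.range maps.length, (if (a : Int) < y then
          ∑ b ∈ Finset.range maps.headI.length, (if x ≤ (b : Int) then
            wc maps (maps.length : Int) (maps.headI.length : Int) p (PySem.Int.floordiv p 2) h y x (a : Int) (b : Int) else 0) else 0) :=
    (Finset.sum_congr rfl (fun yo _ => Finset.sum_congr rfl (fun xo _ =>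
      gqA_np maps (maps.length : Int) (maps.headI.length : Int) p h y x yo xo))).trans
      (quadsum_np maps p (PySem.Int.floordiv p 2) h y x maps.length maps.headI.length)
  have hq3 : ∑ yo ∈ Finset.range h.toNat, ∑ xo ∈ Finset.range h.toNat,
        gqA maps (maps.length : Int) (maps.headI.length : Int) p h (fun a => y + a) (fun b => x - 1 - b) (yo : Int) (xo : Int)
      = ∑ a ∈ Finset.range maps.length, (if y ≤ (a : Int) then
          ∑ b ∈ Finset.range maps.headI.length, (if (b : Int) < x then
            wc maps (maps.length : Int) (maps.headI.length : Int) p (PySem.Int.floordiv p 2) h y x (a : Int) (b : Int) else 0) else 0) :=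
    (Finset.sum_congr rfl (fun yo _ => Finset.sum_congr rfl (fun xo _ =>
      gqA_pn maps (maps.length : Int) (maps.headI.length : Int) p h y x yo xo))).trans
      (quadsum_pn maps p (PySem.Int.floordiv p 2) h y x maps.length maps.headI.length)
  have hq4 : ∑ yo ∈ Finset.range h.toNat, ∑ xo ∈ Finset.range h.toNat,
        gqA maps (maps.length : Int) (maps.headI.length : Int) p h (fun a => y + a) (fun b => x + b) (yo : Int) (xo : Int)
      = ∑ a ∈ Finset.range maps.length, (if y ≤ (a : Int) then
          ∑ b ∈ Finset.range maps.headI.length, (if x ≤ (b : Int) then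
            wc maps (maps.length : Int) (maps.headI.length : Int) p (PySem.Int.floordiv p 2) h y x (a : Int) (b : Int) else 0) else 0) :=
    (Finset.sum_congr rfl (fun yo _ => Finset.sum_congr rfl (fun xo _ =>
      gqA_pp maps (maps.length : Int) (maps.headI.length : Int) p h y x yo xo))).trans
      (quadsum_pp maps p (PySem.Int.floordiv p 2) h y x maps.length maps.headI.length)
  rw [hq1, hq2, hq3, hq4]
  simp only [zero_add]
  rw [← Finset.sum_add_distrib, ← Finset.sum_add_distrib, ← Finset.sum_add_distrib]
  refine Finset.sum_congr rfl (fun a _ => ?_)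
  by_cases hay : y ≤ (a : Int)
  · rw [if_neg (by omega), if_neg (by omega), if_pos hay, if_pos hay, zero_add, zero_add,
      ← Finset.sum_add_distrib]
    refine Finset.sum_congr rfl (fun b _ => ?_)
    split_ifs <;> omega
  · rw [if_pos (by omega), if_pos (by omega), if_neg hay, if_neg hay, add_zero, add_zero,
      ← Finset.sum_add_distrib]
    refine Finset.sum_congr rfl (fun b _ => ?_)
    split_ifs <;> omega

-- ===== B-side: prefix counts =====
theorem pvPref_eq (l : List Int) (p : Int) :
    pvPref l p = (List.range (l.length + 1)).map
      (fun t => (((l.take t).countP (fun v => decide (v ≤ p))) : Int)) := by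
  induction l using List.reverseRecOn with
  | nil => simp [pvPref]
  | append_singleton l v ih =>
    have hstep : pvPref (l ++ [v]) p
        = pvPref l p ++ [PySem.List.pyGetD (pvPref l p) (-1) 0 + (if v ≤ p then 1 else 0)] := by
      unfold pvPref
      rw [List.foldl_append]
      rfl
    rw [hstep, ih]
    have hlast : (List.range (l.length + 1)).map (fun t => (((l.take t).countP (fun v => decide (v ≤ p))) : Int))
        = (List.range l.length).map (fun t => (((l.take t).countP (fun v => decide (v ≤ p))) : Int))
          ++ [(((l.take l.length).countP (fun v => decide (v ≤ p))) : Int)] := by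
      rw [List.range_succ, List.map_append]
      rfl
    rw [hlast, PySem.List.pyGetD_neg_one_append_singleton]
    rw [List.length_append, List.length_singleton]
    rw [List.range_succ, List.map_append, ← hlast]
    congr 1
    · refine List.map_congr_left (fun t ht => ?_)
      rw [List.mem_range] at ht
      rw [List.take_append_of_le_length (by omega)]
    · have htake : List.take (l.length + 1) (l ++ [v]) = l ++ [v] := by
        have hlen : (l ++ [v]).length = l.length + 1 := by simp
        rw [← hlen, List.take_length]
      simp only [List.map_cons, List.map_nil]
      rw [htake, List.countP_append, List.countP_singleton, List.take_length]
      simp only [decide_eq_true_eq]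
      congr 1
      push_cast
      split_ifs <;> simp

theorem pvPref_get (l : List Int) (p : Int) (t : Nat) (ht : t ≤ l.length) :
    PySem.List.pyGetD (pvPref l p) (t : Int) 0
      = (((l.take t).countP (fun v => decide (v ≤ p))) : Int) := by
  rw [pvPref_eq, PySem.List.pyGetD_natCast]
  exact PySem.List.getD_map_range _ _ _ _ (by omega)

theorem cnt_succ (l : List Int) (p : Int) (t : Nat) (ht : t < l.length) :
    (((l.take (t + 1)).countP (fun v => decide (v ≤ p))) : Int)
      = (((l.take t).countP (fun v => decide (v ≤ p))) : Int)
        + (if l.getD t 0 ≤ p then 1 else 0) := by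
  rw [List.take_add_one, List.getElem?_eq_getElem ht, List.countP_append]
  rw [List.getD_eq_getElem l 0 ht]
  push_cast
  simp only [Option.toList_some, List.countP_singleton, decide_eq_true_eq]
  split_ifs <;> simp

theorem pref_diff (l : List Int) (p : Int) (a d : Nat) (hd : a + d ≤ l.length) :
    PySem.List.pyGetD (pvPref l p) ((a + d : Nat) : Int) 0
        - PySem.List.pyGetD (pvPref l p) ((a : Nat) : Int) 0
      = ∑ t ∈ Finset.Ico a (a + d), (if l.getD t 0 ≤ p then 1 else 0) := by
  induction d with
  | zero => simp
  | succ d ih =>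
    have h1 : a + (d + 1) = (a + d) + 1 := by omega
    rw [h1, Finset.sum_Ico_succ_top (by omega)]
    rw [pvPref_get l p ((a + d) + 1) (by omega), cnt_succ l p (a + d) (by omega)]
    rw [← pvPref_get l p (a + d) (by omega)]
    rw [← ih (by omega)]
    ring

-- one diamond row: interior band (threshold p) plus the two boundary cells (threshold q)
theorem wc_split (maps : List (List Int)) (N M p q h y x i : Int)
    (hbi : 0 ≤ i ∧ i < N) (hk : 0 ≤ h - 1 - dy0 y i) (j : Int) (hbj : 0 ≤ j ∧ j < M) :
    wc maps N M p q h y x i j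
      = (if x - (h - 1 - dy0 y i) ≤ j ∧ j < x + (h - 1 - dy0 y i) then indT maps p i j else 0)
        + (if j = x - 1 - (h - 1 - dy0 y i) then indT maps q i j else 0)
        + (if j = x + (h - 1 - dy0 y i) then indT maps q i j else 0) := by
  have hdxn := dy0_nonneg x j
  have hdyn := dy0_nonneg y i
  have hdx : dy0 x j = if x ≤ j then j - x else x - 1 - j := rfl
  unfold wc
  by_cases hxj : x ≤ j
  · rw [hdx, if_pos hxj]
    split_ifs <;> first | ring1 | (exfalso; omega)
  · rw [hdx, if_neg hxj]
    split_ifs <;> first | ring1 | (exfalso; omega)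

-- per-row contribution computed by B
def rowB (maps prefP : List (List Int)) (M q h y x i : Int) : Int :=
  let dy := if y ≤ i then i - y else y - 1 - i
  let k := h - 1 - dy
  (if max 0 (x - k) < min M (x + k) then
      PySem.List.pyGetD (PySem.List.pyGetD prefP i []) (min M (x + k)) 0
        - PySem.List.pyGetD (PySem.List.pyGetD prefP i []) (max 0 (x - k)) 0
    else 0)
  + (if 0 ≤ x - 1 - k ∧ pvCell maps i (x - 1 - k) ≤ q then 1 else 0)
  + (if x + k < M ∧ pvCell maps i (x + k) ≤ q then 1 else 0)

theorem rowB_eq (maps prefP : List (List Int)) (p q h y x i : Int)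
    (hq : q = PySem.Int.floordiv p 2)
    (hpref : prefP = maps.foldl (fun acc row =>
      acc ++ [pvPref (PySem.List.slice row none (some (maps.headI.length : Int))) p]) [])
    (hrows : ∀ row ∈ maps, maps.headI.length ≤ row.length)
    (hi0 : 0 ≤ i) (hiN : i < (maps.length : Int))
    (hx0 : 0 ≤ x) (hxM : x < (maps.headI.length : Int))
    (hdy : dy0 y i ≤ h - 1) :
    rowB maps prefP (maps.headI.length : Int) q h y x i
      = ∑ b ∈ Finset.range maps.headI.length,
          wc maps (maps.length : Int) (maps.headI.length : Int) p q h y x i (b : Int) := by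
  have hk : 0 ≤ h - 1 - dy0 y i := by omega
  -- the row list and its take-to-M prefix
  have hrowget : PySem.List.pyGetD maps i [] = maps[i.toNat]'(by omega) :=
    PySem.List.pyGetD_eq_getElem maps [] hi0 (by omega)
  have hlen : maps.headI.length ≤ (maps[i.toNat]'(by omega)).length :=
    hrows _ (List.getElem_mem _)
  have hslice : PySem.List.slice (maps[i.toNat]'(by omega)) none (some (maps.headI.length : Int))
      = (maps[i.toNat]'(by omega)).take maps.headI.length := by
    rw [PySem.List.slice_to _ (by omega)]
    congr 1
  have hslicelen : ((maps[i.toNat]'(by omega)).take maps.headI.length).length = maps.headI.length := by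
    rw [List.length_take]
    omega
  -- B's prefix list for this row
  have hprefPi : PySem.List.pyGetD prefP i []
      = pvPref ((maps[i.toNat]'(by omega)).take maps.headI.length) p := by
    rw [hpref, PySem.List.foldl_append_singleton_eq_map, List.nil_append]
    rw [PySem.List.pyGetD_eq_getElem _ [] hi0 (by simp; omega)]
    rw [List.getElem_map]
    rw [hslice]
  -- cell values seen through the sliced row
  have hcell : ∀ b : Nat, b < maps.headI.length →
      pvCell maps i (b : Int) = ((maps[i.toNat]'(by omega)).take maps.headI.length).getD b 0 := by
    intro b hb
    unfold pvCell
    rw [hrowget, PySem.List.pyGetD_natCast]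
    rw [List.getD_eq_getElem?_getD, List.getD_eq_getElem?_getD, List.getElem?_take]
    rw [if_pos hb]
  -- split the row sum into band + two points
  have hsplit : ∑ b ∈ Finset.range maps.headI.length,
        wc maps (maps.length : Int) (maps.headI.length : Int) p q h y x i (b : Int)
      = (∑ b ∈ Finset.range maps.headI.length,
          (if x - (h - 1 - dy0 y i) ≤ (b : Int) ∧ (b : Int) < x + (h - 1 - dy0 y i) then indT maps p i (b : Int) else 0))
        + (∑ b ∈ Finset.range maps.headI.length,
          (if (b : Int) = x - 1 - (h - 1 - dy0 y i) then indT maps q i (b : Int) else 0))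
        + (∑ b ∈ Finset.range maps.headI.length,
          (if (b : Int) = x + (h - 1 - dy0 y i) then indT maps q i (b : Int) else 0)) := by
    rw [← Finset.sum_add_distrib, ← Finset.sum_add_distrib]
    refine Finset.sum_congr rfl (fun b hb => ?_)
    rw [Finset.mem_range] at hb
    exact wc_split maps _ _ p q h y x i ⟨hi0, hiN⟩ hk (b : Int) (by omega)
  rw [hsplit]
  -- band part equals the prefix difference
  have hband : ∑ b ∈ Finset.range maps.headI.length,
        (if x - (h - 1 - dy0 y i) ≤ (b : Int) ∧ (b : Int) < x + (h - 1 - dy0 y i) then indT maps p i (b : Int) else 0)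
      = (if max 0 (x - (h - 1 - dy0 y i)) < min (maps.headI.length : Int) (x + (h - 1 - dy0 y i)) then
          PySem.List.pyGetD (PySem.List.pyGetD prefP i []) (min (maps.headI.length : Int) (x + (h - 1 - dy0 y i))) 0
            - PySem.List.pyGetD (PySem.List.pyGetD prefP i []) (max 0 (x - (h - 1 - dy0 y i))) 0
        else 0) := by
    rw [sum_band]
    set k := h - 1 - dy0 y i with hkdef
    have hA : max 0 (x - k) = (((x - k).toNat : Nat) : Int) := by omega
    have hB : min (maps.headI.length : Int) (x + k) = ((min (x + k).toNat maps.headI.length : Nat) : Int) := by omega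
    by_cases hab : (x - k).toNat < min (x + k).toNat maps.headI.length
    · rw [if_pos (by omega)]
      have hd : (x - k).toNat + (min (x + k).toNat maps.headI.length - (x - k).toNat)
          = min (x + k).toNat maps.headI.length := by omega
      rw [hprefPi, hA, hB, ← hd]
      rw [pref_diff _ p _ _ (by rw [hslicelen]; omega)]
      rw [hd]
      refine Finset.sum_congr rfl (fun t ht => ?_)
      rw [Finset.mem_Ico] at ht
      unfold indT
      rw [hcell t (by omega)]
    · rw [if_neg (by omega)]
      rw [Finset.Ico_eq_empty (by omega), Finset.sum_empty]
  rw [hband]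
  -- the two boundary points
  have hp1 : ∑ b ∈ Finset.range maps.headI.length,
        (if (b : Int) = x - 1 - (h - 1 - dy0 y i) then indT maps q i (b : Int) else 0)
      = (if 0 ≤ x - 1 - (h - 1 - dy0 y i) ∧ pvCell maps i (x - 1 - (h - 1 - dy0 y i)) ≤ q then 1 else 0) := by
    rw [sum_point]
    set k := h - 1 - dy0 y i with hkdef
    by_cases hjl : 0 ≤ x - 1 - k
    · rw [if_pos (by constructor <;> omega)]
      unfold indT
      have : ((x - 1 - k).toNat : Int) = x - 1 - k := by omega
      rw [this]
      split_ifs with h1 h2 <;> first | rfl | (exfalso; omega) | (exfalso; exact h2 ⟨hjl, h1⟩) | (exfalso; exact h1 h2.2)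
    · rw [if_neg (by omega), if_neg (by omega)]
  have hp2 : ∑ b ∈ Finset.range maps.headI.length,
        (if (b : Int) = x + (h - 1 - dy0 y i) then indT maps q i (b : Int) else 0)
      = (if x + (h - 1 - dy0 y i) < (maps.headI.length : Int) ∧ pvCell maps i (x + (h - 1 - dy0 y i)) ≤ q then 1 else 0) := by
    rw [sum_point]
    set k := h - 1 - dy0 y i with hkdef
    by_cases hjr : x + k < (maps.headI.length : Int)
    · rw [if_pos (by constructor <;> omega)]
      unfold indT
      have : ((x + k).toNat : Int) = x + k := by omega
      rw [this]
      split_ifs with h1 h2 <;> first | rfl | (exfalso; omega) | (exfalso; exact h2 ⟨hjr, h1⟩) | (exfalso; exact h1 h2.2)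
    · rw [if_neg (by omega), if_neg (by omega)]
  rw [hp1, hp2]
  unfold rowB
  have hdy0 : (if y ≤ i then i - y else y - 1 - i) = dy0 y i := rfl
  rw [hdy0]

-- unfold the two ports to folds over centres (definitional)
theorem solution_eq_fold (maps : List (List Int)) (p r : Int) :
    solution maps p r
      = (PySem.List.pyRange 0 (maps.length : Int) 1).foldl (fun answer y =>
          (PySem.List.pyRange 0 (maps.headI.length : Int) 1).foldl (fun answer x =>
            max answer ((centerA maps p (PySem.Int.floordiv r 2) y x).1
              + (centerA maps p (PySem.Int.floordiv r 2) y x).2)) answer) 0 := rfl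

theorem solution_alt_eq_fold (maps : List (List Int)) (p r : Int) :
    solution_alt maps p r
      = (PySem.List.pyRange 0 (maps.length : Int) 1).foldl (fun best y =>
          (PySem.List.pyRange 0 (maps.headI.length : Int) 1).foldl (fun best x =>
            let cnt := (PySem.List.pyRange (max 0 (y - PySem.Int.floordiv r 2))
                (min (maps.length : Int) (y + PySem.Int.floordiv r 2)) 1).foldl (fun cnt i =>
              let dy := if y ≤ i then i - y else y - 1 - i
              let k := PySem.Int.floordiv r 2 - 1 - dy
              let a := max 0 (x - k)
              let b := min (maps.headI.length : Int) (x + k)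
              let cnt := if a < b then
                  cnt + PySem.List.pyGetD (PySem.List.pyGetD (maps.foldl (fun acc row =>
                      acc ++ [pvPref (PySem.List.slice row none (some (maps.headI.length : Int))) p]) []) i []) b 0
                    - PySem.List.pyGetD (PySem.List.pyGetD (maps.foldl (fun acc row =>
                      acc ++ [pvPref (PySem.List.slice row none (some (maps.headI.length : Int))) p]) []) i []) a 0
                else cnt
              let cnt := if 0 ≤ x - 1 - k ∧ pvCell maps i (x - 1 - k) ≤ PySem.Int.floordiv p 2 then cnt + 1 else cnt
              if x + k < (maps.headI.length : Int) ∧ pvCell maps i (x + k) ≤ PySem.Int.floordiv p 2 then cnt + 1 else cnt) 0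
            if best < cnt then cnt else best) best) 0 := rfl

theorem stepB_abs (c1 c2 c3 : Prop) [Decidable c1] [Decidable c2] [Decidable c3] (cnt X Y : Int) :
    (if c3 then (if c2 then (if c1 then cnt + X - Y else cnt) + 1 else (if c1 then cnt + X - Y else cnt)) + 1
      else (if c2 then (if c1 then cnt + X - Y else cnt) + 1 else (if c1 then cnt + X - Y else cnt)))
    = cnt + ((if c1 then X - Y else 0) + (if c2 then 1 else 0) + (if c3 then 1 else 0)) := by
  split_ifs <;> ring

-- per-centre equality of the two ports
theorem center_eq (maps : List (List Int)) (p r : Int)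
    (hrows : 1 ≤ PySem.Int.floordiv r 2 → ∀ row ∈ maps, maps.headI.length ≤ row.length)
    (y x : Int) (hy0 : 0 ≤ y) (hyN : y < (maps.length : Int))
    (hx0 : 0 ≤ x) (hxM : x < (maps.headI.length : Int)) :
    (centerA maps p (PySem.Int.floordiv r 2) y x).1 + (centerA maps p (PySem.Int.floordiv r 2) y x).2
      = (PySem.List.pyRange (max 0 (y - PySem.Int.floordiv r 2))
            (min (maps.length : Int) (y + PySem.Int.floordiv r 2)) 1).foldl (fun cnt i =>
          let dy := if y ≤ i then i - y else y - 1 - i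
          let k := PySem.Int.floordiv r 2 - 1 - dy
          let a := max 0 (x - k)
          let b := min (maps.headI.length : Int) (x + k)
          let cnt := if a < b then
              cnt + PySem.List.pyGetD (PySem.List.pyGetD (maps.foldl (fun acc row =>
                  acc ++ [pvPref (PySem.List.slice row none (some (maps.headI.length : Int))) p]) []) i []) b 0
                - PySem.List.pyGetD (PySem.List.pyGetD (maps.foldl (fun acc row =>
                  acc ++ [pvPref (PySem.List.slice row none (some (maps.headI.length : Int))) p]) []) i []) a 0
            else cnt
          let cnt := if 0 ≤ x - 1 - k ∧ pvCell maps i (x - 1 - k) ≤ PySem.Int.floordiv p 2 then cnt + 1 else cnt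
          if x + k < (maps.headI.length : Int) ∧ pvCell maps i (x + k) ≤ PySem.Int.floordiv p 2 then cnt + 1 else cnt) 0 := by
  have hstep : ∀ (cnt i : Int),
      (let dy := if y ≤ i then i - y else y - 1 - i
       let k := PySem.Int.floordiv r 2 - 1 - dy
       let a := max 0 (x - k)
       let b := min (maps.headI.length : Int) (x + k)
       let cnt := if a < b then
           cnt + PySem.List.pyGetD (PySem.List.pyGetD (maps.foldl (fun acc row =>
               acc ++ [pvPref (PySem.List.slice row none (some (maps.headI.length : Int))) p]) []) i []) b 0
             - PySem.List.pyGetD (PySem.List.pyGetD (maps.foldl (fun acc row =>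
               acc ++ [pvPref (PySem.List.slice row none (some (maps.headI.length : Int))) p]) []) i []) a 0
         else cnt
       let cnt := if 0 ≤ x - 1 - k ∧ pvCell maps i (x - 1 - k) ≤ PySem.Int.floordiv p 2 then cnt + 1 else cnt
       if x + k < (maps.headI.length : Int) ∧ pvCell maps i (x + k) ≤ PySem.Int.floordiv p 2 then cnt + 1 else cnt)
      = cnt + rowB maps (maps.foldl (fun acc row =>
          acc ++ [pvPref (PySem.List.slice row none (some (maps.headI.length : Int))) p]) [])
          (maps.headI.length : Int) (PySem.Int.floordiv p 2) (PySem.Int.floordiv r 2) y x i := by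
    intro cnt i
    dsimp only
    unfold rowB
    exact stepB_abs _ _ _ cnt _ _
  rw [PySem.List.foldl_congr_mem _ _ _ _ (fun acc x hx => hstep acc x)]
  rw [PySem.List.foldl_add]
  rw [PySem.List.pyRange_one, List.map_map, list_sum_range, zero_add]
  rw [centerA_sum]
  by_cases hh : PySem.Int.floordiv r 2 ≤ 0
  · have hzero : ∀ a ∈ Finset.range maps.length, ∑ b ∈ Finset.range maps.headI.length,
        wc maps (maps.length : Int) (maps.headI.length : Int) p (PySem.Int.floordiv p 2)
          (PySem.Int.floordiv r 2) y x (a : Int) (b : Int) = 0 := by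
      intro a _
      refine Finset.sum_eq_zero (fun b _ => ?_)
      unfold wc
      rw [if_neg]
      have := dy0_nonneg y (a : Int)
      have := dy0_nonneg x (b : Int)
      omega
    rw [Finset.sum_eq_zero hzero]
    have hlen0 : (min (maps.length : Int) (y + PySem.Int.floordiv r 2)
        - max 0 (y - PySem.Int.floordiv r 2)).toNat = 0 := by omega
    rw [hlen0, Finset.range_zero, Finset.sum_empty]
  · have hh1 : 1 ≤ PySem.Int.floordiv r 2 := by omega
    have hrows' := hrows hh1
    have hrowsum : ∀ k ∈ Finset.range (min (maps.length : Int) (y + PySem.Int.floordiv r 2)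
          - max 0 (y - PySem.Int.floordiv r 2)).toNat,
        ((rowB maps (maps.foldl (fun acc row =>
            acc ++ [pvPref (PySem.List.slice row none (some (maps.headI.length : Int))) p]) [])
            (maps.headI.length : Int) (PySem.Int.floordiv p 2) (PySem.Int.floordiv r 2) y x) ∘
          (fun k : Nat => max 0 (y - PySem.Int.floordiv r 2) + (k : Int))) k
        = ∑ b ∈ Finset.range maps.headI.length,
            wc maps (maps.length : Int) (maps.headI.length : Int) p (PySem.Int.floordiv p 2)
              (PySem.Int.floordiv r 2) y x (max 0 (y - PySem.Int.floordiv r 2) + (k : Int)) (b : Int) := by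
      intro k hk
      rw [Finset.mem_range] at hk
      simp only [Function.comp_apply]
      refine rowB_eq maps _ p _ _ y x _ rfl rfl hrows' (by omega) (by omega) hx0 hxM ?_
      unfold dy0
      split_ifs <;> omega
    have hshift := sum_range_shift_int (fun i => ∑ b ∈ Finset.range maps.headI.length,
        wc maps (maps.length : Int) (maps.headI.length : Int) p (PySem.Int.floordiv p 2)
          (PySem.Int.floordiv r 2) y x i (b : Int)) maps.length
        (max 0 (y - PySem.Int.floordiv r 2))
        (min (maps.length : Int) (y + PySem.Int.floordiv r 2)
          - max 0 (y - PySem.Int.floordiv r 2)).toNat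
      (fun i hi => Finset.sum_eq_zero (fun b _ => wc_zero_out _ _ _ _ _ _ _ _ _ _ (by omega)))
      (fun i hi => Finset.sum_eq_zero (fun b _ => wc_zero_out _ _ _ _ _ _ _ _ _ _ (by omega)))
      (fun i h0i hi => Finset.sum_eq_zero (fun b _ => wc_zero_row _ _ _ _ _ _ _ _ _ i
        (by unfold dy0; split_ifs <;> omega)))
      (fun i hi => by
        by_cases hiN' : (maps.length : Int) ≤ i
        · exact Finset.sum_eq_zero (fun b _ => wc_zero_out _ _ _ _ _ _ _ _ _ _ (by omega))
        · exact Finset.sum_eq_zero (fun b _ => wc_zero_row _ _ _ _ _ _ _ _ _ i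
            (by unfold dy0; split_ifs <;> omega)))
    beta_reduce at hshift
    rw [hshift]
    exact (Finset.sum_congr rfl hrowsum).symm

theorem max_as_if (a v : Int) : max a v = if a < v then v else a := by
  rw [max_def]
  split_ifs <;> omega

-- ===== VERDICT (by name: the statement is the Claim_ definition above) =====
theorem solution_spec : Claim_equal_solution := by
  intro maps p r hdom hpre
  unfold Spec_solution
  rw [solution_eq_fold, solution_alt_eq_fold]
  have hrows : 1 ≤ PySem.Int.floordiv r 2 → ∀ row ∈ maps, maps.headI.length ≤ row.length := by
    intro h1
    have h2 := (PySem.Int.le_floordiv_iff_mul_le (by norm_num : (0:Int) < 2)).1 h1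
    exact hpre.2 (by omega)
  refine PySem.List.foldl_congr_mem _ _ _ _ ?_
  intro acc y hy
  rw [PySem.List.mem_pyRange_one] at hy
  refine PySem.List.foldl_congr_mem _ _ _ _ ?_
  intro acc' x hx
  rw [PySem.List.mem_pyRange_one] at hx
  dsimp only
  rw [center_eq maps p r hrows y x hy.1 hy.2 hx.1 hx.2]
  exact max_as_if _ _
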